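-- pv_equiv track=rewrite | github.com/alecsena/simuladooab | backend/app/services/simulado_service.py | corrigir_sessao
-- ===== SOURCE A (Python) =====
-- def corrigir_sessao(questoes: list[dict]) -> tuple[int, int, dict]:
--     score = 0
--     total = 0
--     por_disciplina: dict[str, dict] = {}
--
--     for q in questoes:
--         gabarito = q.get("gabarito")
--         if not gabarito:
--             continue
--         total += 1
--         disc = q.get("disciplina", "Não classificada")
--         if disc not in por_disciplina:
--             por_disciplina[disc] = {"acertos": 0, "total": 0, "erros": 0}
--         por_disciplina[disc]["total"] += 1
--
--         resposta = q.get("resposta_usuario")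
--         if resposta and resposta.upper() == gabarito.upper():
--             score += 1
--             q["correta"] = True
--             por_disciplina[disc]["acertos"] += 1
--         else:
--             q["correta"] = False
--             por_disciplina[disc]["erros"] += 1
--
--     return score, total, por_disciplina
-- ===== SOURCE B (Python) =====
-- def corrigir_sessao(questoes: list[dict]) -> tuple[int, int, dict]:
--     # Pass 1: group the gradable questions by discipline, in first-appearance order.
--     grupos: dict[str, list] = {}
--     for q in questoes:
--         if q.get("gabarito"):
--             grupos.setdefault(q.get("disciplina", "Não classificada"), []).append(q)
--
--     # Pass 2: aggregate each group.
--     score = 0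
--     total = 0
--     por_disciplina: dict[str, dict] = {}
--     for disc, grupo in grupos.items():
--         acertos = 0
--         for q in grupo:
--             resposta = q.get("resposta_usuario")
--             correta = bool(resposta) and resposta.upper() == q["gabarito"].upper()
--             q["correta"] = correta
--             if correta:
--                 acertos += 1
--         n = len(grupo)
--         por_disciplina[disc] = {"acertos": acertos, "total": n, "erros": n - acertos}
--         score += acertos
--         total += n
--     return score, total, por_disciplina
-- ===== Notes on version B (the rewrite author's own statement) =====
-- stated objective: alternative
-- what changed: A interleaves scoring and per-discipline accumulation in one loop over a nested stats dict; B first builds an ordered index grouping gradable questions by discipline, then aggregates each group in a second pass.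
import Mathlib
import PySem

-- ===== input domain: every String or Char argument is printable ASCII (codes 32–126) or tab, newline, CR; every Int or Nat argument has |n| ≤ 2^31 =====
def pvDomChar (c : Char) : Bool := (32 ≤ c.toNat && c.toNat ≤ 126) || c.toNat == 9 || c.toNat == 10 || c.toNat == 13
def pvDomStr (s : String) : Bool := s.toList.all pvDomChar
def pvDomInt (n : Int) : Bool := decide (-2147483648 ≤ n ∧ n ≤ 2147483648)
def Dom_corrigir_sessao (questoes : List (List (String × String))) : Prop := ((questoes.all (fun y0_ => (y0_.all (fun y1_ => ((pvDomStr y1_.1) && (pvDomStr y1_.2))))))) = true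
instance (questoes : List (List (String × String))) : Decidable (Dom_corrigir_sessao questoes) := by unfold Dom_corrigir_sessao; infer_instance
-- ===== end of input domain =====

-- B replaces A's single pass with an index-then-aggregate decomposition: group gradable questions
-- by discipline first, then aggregate each group (objective: alternative, same cost). Both Pythons
-- also set q["correta"] on the same questions with the same values; only the RETURN value is proved here.

-- ===== PORT A =====
-- q.get(k): first-match lookup in the question dict
def pvQGet (q : List (String × String)) (k : String) : Option String :=
  (PySem.Dict.mk q).get? k

-- the literal {"acertos": 0, "total": 0, "erros": 0}
def pvI0 : PySem.Dict String Int :=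
  PySem.Dict.mk [("acertos", 0), ("total", 0), ("erros", 0)]

-- the body of A's single loop
def pvStepA (st : Int × Int × PySem.Dict String (PySem.Dict String Int))
    (q : List (String × String)) : Int × Int × PySem.Dict String (PySem.Dict String Int) :=
  match pvQGet q "gabarito" with
  | none => st
  | some gabarito =>
    if gabarito = "" then st
    else
      let total := st.2.1 + 1
      let disc := (pvQGet q "disciplina").getD "Não classificada"
      let por := if st.2.2.contains disc then st.2.2 else st.2.2.insert disc pvI0
      let por := por.modify disc pvI0 (fun inn => inn.modify "total" 0 (· + 1))
      match pvQGet q "resposta_usuario" with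
      | some resposta =>
        if resposta != "" && (PySem.Str.upper resposta == PySem.Str.upper gabarito) then
          (st.1 + 1, total, por.modify disc pvI0 (fun inn => inn.modify "acertos" 0 (· + 1)))
        else
          (st.1, total, por.modify disc pvI0 (fun inn => inn.modify "erros" 0 (· + 1)))
      | none =>
          (st.1, total, por.modify disc pvI0 (fun inn => inn.modify "erros" 0 (· + 1)))

def corrigir_sessao (questoes : List (List (String × String))) :
    Int × Int × (List (String × List (String × Int))) :=
  let st := questoes.foldl pvStepA (0, 0, PySem.Dict.empty)
  (st.1, st.2.1, st.2.2.items.map (fun p => (p.1, p.2.items)))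

-- ===== PORT B =====
def pvDisc (q : List (String × String)) : String :=
  (pvQGet q "disciplina").getD "Não classificada"

-- correta = bool(resposta) and resposta.upper() == q["gabarito"].upper()
-- (B only evaluates q["gabarito"] on grouped questions, where the key is present, so the
--  .getD "" default is never the value actually compared)
def pvCorreta (q : List (String × String)) : Bool :=
  match pvQGet q "resposta_usuario" with
  | some r => r != "" && (PySem.Str.upper r == PySem.Str.upper ((pvQGet q "gabarito").getD ""))
  | none => false

-- pass 1 body: grupos.setdefault(disc, []).append(q) for gradable q
def pvStepB1 (d : PySem.Dict String (List (List (String × String))))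
    (q : List (String × String)) : PySem.Dict String (List (List (String × String))) :=
  match pvQGet q "gabarito" with
  | none => d
  | some g => if g = "" then d else d.modify (pvDisc q) [] (· ++ [q])

-- B's inner counting loop over one group
def pvAcertos (grupo : List (List (String × String))) : Int :=
  grupo.foldl (fun a q => if pvCorreta q then a + 1 else a) 0

-- pass 2 body: aggregate one group
def pvStepB2 (st : Int × Int × PySem.Dict String (List (String × Int)))
    (gr : String × List (List (String × String))) :
    Int × Int × PySem.Dict String (List (String × Int)) :=
  let acertos := pvAcertos gr.2
  let n : Int := gr.2.length
  (st.1 + acertos, st.2.1 + n,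
    st.2.2.insert gr.1 [("acertos", acertos), ("total", n), ("erros", n - acertos)])

def corrigir_sessao_alt (questoes : List (List (String × String))) :
    Int × Int × (List (String × List (String × Int))) :=
  let grupos := questoes.foldl pvStepB1 PySem.Dict.empty
  let res := grupos.items.foldl pvStepB2 (0, 0, PySem.Dict.empty)
  (res.1, res.2.1, res.2.2.items)

-- ===== PRECONDITION & SPEC =====
def Spec_corrigir_sessao (questoes : List (List (String × String))) (out : Int × Int × (List (String × List (String × Int)))) : Prop := out = corrigir_sessao_alt questoes
instance (questoes : List (List (String × String))) (out : Int × Int × (List (String × List (String × Int)))) : Decidable (Spec_corrigir_sessao questoes out) := by unfold Spec_corrigir_sessao; infer_instance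

-- ===== CLAIM (what is proved, stated in full; the proofs are below) =====
def Claim_equal_corrigir_sessao : Prop := ∀ (questoes : List (List (String × String))), Dom_corrigir_sessao questoes → Spec_corrigir_sessao questoes (corrigir_sessao questoes)

-- ===== LEMMAS AND PROOFS =====

-- abbreviations used only by the proofs
def pvValid (q : List (String × String)) : Bool :=
  match pvQGet q "gabarito" with
  | some g => g != ""
  | none => false

def pvLV (l : List (List (String × String))) : List (List (String × String)) :=
  l.filter pvValid

def pvGrp (c : String) (l : List (List (String × String))) : List (List (String × String)) :=
  (pvLV l).filter (fun q => pvDisc q == c)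

def pvK (l : List (List (String × String))) : List String :=
  PySem.Set.ofList ((pvLV l).map pvDisc)

def pvCnt (qs : List (List (String × String))) : Int := (qs.countP pvCorreta : Int)

def pvTri (a t e : Int) : PySem.Dict String Int :=
  PySem.Dict.mk [("acertos", a), ("total", t), ("erros", e)]

-- the per-question update of one discipline's inner dict, as A performs it
def pvInn (inn : PySem.Dict String Int) (q : List (String × String)) : PySem.Dict String Int :=
  (inn.modify "total" 0 (· + 1)).modify (if pvCorreta q then "acertos" else "erros") 0 (· + 1)

-- A's step, split into three independent component updates
def pvSStep (s : Int) (q : List (String × String)) : Int :=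
  if pvValid q && pvCorreta q then s + 1 else s

def pvTStep (t : Int) (q : List (String × String)) : Int :=
  if pvValid q then t + 1 else t

def pvPStep (d : PySem.Dict String (PySem.Dict String Int)) (q : List (String × String)) :
    PySem.Dict String (PySem.Dict String Int) :=
  if pvValid q then
    ((if d.contains (pvDisc q) then d else d.insert (pvDisc q) pvI0).modify (pvDisc q) pvI0
        (fun inn => inn.modify "total" 0 (· + 1))).modify (pvDisc q) pvI0
      (fun inn => inn.modify (if pvCorreta q then "acertos" else "erros") 0 (· + 1))
  else d

theorem stepA_split (st : Int × Int × PySem.Dict String (PySem.Dict String Int))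
    (q : List (String × String)) :
    pvStepA st q = (pvSStep st.1 q, pvTStep st.2.1 q, pvPStep st.2.2 q) := by
  rcases hg : pvQGet q "gabarito" with _ | g <;>
    simp only [pvStepA, pvSStep, pvTStep, pvPStep, pvValid, pvCorreta, pvDisc, hg]
  · rfl
  · by_cases he : g = ""
    · simp [he]
    · rcases hr : pvQGet q "resposta_usuario" with _ | r
      · simp [he]
      · simp only [Option.getD_some]
        by_cases hc : (r != "" && (PySem.Str.upper r == PySem.Str.upper g)) = true <;>
          simp [hc, he]

theorem foldl_prod3 {Q D : Type} (f1 : Int → Q → Int) (f2 : Int → Q → Int) (f3 : D → Q → D) :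
    ∀ (l : List Q) (s t : Int) (d : D),
      l.foldl (fun st q => (f1 st.1 q, f2 st.2.1 q, f3 st.2.2 q)) (s, t, d) =
        (l.foldl f1 s, l.foldl f2 t, l.foldl f3 d) := by
  intro l
  induction l with
  | nil => intro s t d; rfl
  | cons q l ih => intro s t d; simpa using ih (f1 s q) (f2 t q) (f3 d q)

theorem foldA_split (l : List (List (String × String))) (s t : Int)
    (d : PySem.Dict String (PySem.Dict String Int)) :
    l.foldl pvStepA (s, t, d) = (l.foldl pvSStep s, l.foldl pvTStep t, l.foldl pvPStep d) := by
  have h : pvStepA = fun st q => (pvSStep st.1 q, pvTStep st.2.1 q, pvPStep st.2.2 q) := by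
    funext st q; exact stepA_split st q
  rw [h, foldl_prod3]

theorem score_fold (l : List (List (String × String))) (s : Int) :
    l.foldl pvSStep s = s + pvCnt (pvLV l) := by
  have h : pvSStep = fun (a : Int) q => if (fun q => pvValid q && pvCorreta q) q then a + 1 else a := rfl
  rw [h, PySem.List.foldl_count_if]
  simp only [pvCnt, pvLV, List.countP_filter]
  congr 1
  exact_mod_cast List.countP_congr (fun q _ => by simp [Bool.and_comm])

theorem total_fold (l : List (List (String × String))) (t : Int) :
    l.foldl pvTStep t = t + ((pvLV l).length : Int) := by
  have h : pvTStep = fun (a : Int) q => if pvValid q then a + 1 else a := rfl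
  rw [h, PySem.List.foldl_count_if]
  simp [pvLV, List.countP_eq_length_filter]

-- pointwise effect of one A-step on the discipline dict
theorem pstep_getD (d : PySem.Dict String (PySem.Dict String Int)) (q : List (String × String))
    (hv : pvValid q = true) (c : String) :
    (pvPStep d q).getD c pvI0 =
      if c = pvDisc q then pvInn (d.getD (pvDisc q) pvI0) q else d.getD c pvI0 := by
  unfold pvPStep pvInn
  rw [if_pos hv]
  by_cases h : d.contains (pvDisc q) = true
  · simp only [h, if_true, PySem.Dict.getD_modify]
    by_cases hc : c = pvDisc q <;> simp [hc]
  · have hf : d.contains (pvDisc q) = false := by simpa using h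
    simp only [hf, Bool.false_eq_true, if_false, PySem.Dict.getD_modify, PySem.Dict.getD_insert]
    by_cases hc : c = pvDisc q <;>
      simp [hc, PySem.Dict.getD_of_not_contains d pvI0 hf]

theorem pfold_getD :
    ∀ (l : List (List (String × String))) (d : PySem.Dict String (PySem.Dict String Int)) (c : String),
      (l.foldl pvPStep d).getD c pvI0 = (pvGrp c l).foldl pvInn (d.getD c pvI0) := by
  intro l
  induction l with
  | nil => intro d c; rfl
  | cons q l ih =>
    intro d c
    by_cases hv : pvValid q = true
    · have hgrp : pvGrp c (q :: l) =
          if pvDisc q == c then q :: pvGrp c l else pvGrp c l := by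
        simp only [pvGrp, pvLV, List.filter_cons, hv]
        by_cases hd : (pvDisc q == c) = true <;> simp [hd]
      rw [List.foldl_cons, ih (pvPStep d q) c, pstep_getD d q hv c, hgrp]
      by_cases hc : c = pvDisc q
      · simp [hc]
      · have : (pvDisc q == c) = false := by simp [Ne.symm hc]
        simp [this, hc]
    · have hv' : pvValid q = false := by simpa using hv
      have hstep : pvPStep d q = d := by unfold pvPStep; rw [if_neg (by simp [hv'])]
      have hgrp : pvGrp c (q :: l) = pvGrp c l := by
        simp [pvGrp, pvLV, hv']
      rw [List.foldl_cons, hstep, hgrp, ih d c]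

-- keys evolution of one A-step
theorem pstep_keys (d : PySem.Dict String (PySem.Dict String Int)) (q : List (String × String))
    (hv : pvValid q = true) :
    (pvPStep d q).keys = PySem.Set.add d.keys (pvDisc q) := by
  unfold pvPStep
  rw [if_pos hv]
  by_cases h : d.contains (pvDisc q) = true
  · rw [if_pos h, PySem.Dict.keys_modify, PySem.Dict.keys_insert_of_contains,
        PySem.Dict.keys_modify, PySem.Dict.keys_insert_of_contains _ _ h]
    · simp [PySem.Set.add, (PySem.Dict.contains_iff_mem_keys d (pvDisc q)).mp h]
    · rw [PySem.Dict.contains_modify]; simp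
  · have hf : d.contains (pvDisc q) = false := by simpa using h
    rw [if_neg (by simp [hf]), PySem.Dict.keys_modify, PySem.Dict.keys_insert_of_contains,
        PySem.Dict.keys_modify, PySem.Dict.keys_insert_of_contains,
        PySem.Dict.keys_insert_of_not_contains _ _ hf]
    · have : ¬ pvDisc q ∈ d.keys := by
        intro hm; exact absurd ((PySem.Dict.contains_iff_mem_keys d (pvDisc q)).mpr hm) (by simp [hf])
      simp [PySem.Set.add, this]
    · exact PySem.Dict.contains_insert_self d (pvDisc q) pvI0
    · rw [PySem.Dict.contains_modify]; simp

theorem pfold_keys :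
    ∀ (l : List (List (String × String))) (d : PySem.Dict String (PySem.Dict String Int)),
      (l.foldl pvPStep d).keys = PySem.Set.update d.keys ((pvLV l).map pvDisc) := by
  intro l
  induction l with
  | nil => intro d; simp [pvLV, PySem.Set.update_nil]
  | cons q l ih =>
    intro d
    by_cases hv : pvValid q = true
    · rw [List.foldl_cons, ih (pvPStep d q), pstep_keys d q hv]
      simp [pvLV, hv, PySem.Set.update_cons]
    · have hv' : pvValid q = false := by simpa using hv
      have hstep : pvPStep d q = d := by unfold pvPStep; rw [if_neg (by simp [hv'])]
      rw [List.foldl_cons, hstep, ih d]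
      simp [pvLV, hv']

-- effect of pvInn on a literal triple dict
theorem inn_tri (a t e : Int) (q : List (String × String)) :
    pvInn (pvTri a t e) q =
      if pvCorreta q then pvTri (a + 1) (t + 1) e else pvTri a (t + 1) (e + 1) := by
  unfold pvInn pvTri
  by_cases h : pvCorreta q = true <;> simp only [h, ite_true] <;> rfl

theorem tri_eq_iff (a t e a' t' e' : Int) :
    pvTri a t e = pvTri a' t' e' ↔ a = a' ∧ t = t' ∧ e = e' := by
  constructor
  · intro h
    have := congrArg PySem.Dict.items h
    simp [pvTri] at this
    exact this
  · rintro ⟨rfl, rfl, rfl⟩; rfl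

theorem fold_tri :
    ∀ (qs : List (List (String × String))) (a t e : Int),
      qs.foldl pvInn (pvTri a t e) =
        pvTri (a + pvCnt qs) (t + (qs.length : Int)) (e + ((qs.length : Int) - pvCnt qs)) := by
  intro qs
  induction qs with
  | nil => intro a t e; simp [pvCnt]
  | cons q qs ih =>
    intro a t e
    rw [List.foldl_cons, inn_tri]
    by_cases h : pvCorreta q = true
    · rw [if_pos h, ih, tri_eq_iff]
      have hc : pvCnt (q :: qs) = pvCnt qs + 1 := by simp [pvCnt, h]
      refine ⟨?_, ?_, ?_⟩ <;> (push_cast [List.length_cons]; omega)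
    · rw [if_neg h, ih, tri_eq_iff]
      have hc : pvCnt (q :: qs) = pvCnt qs := by simp [pvCnt, h]
      refine ⟨?_, ?_, ?_⟩ <;> (push_cast [List.length_cons]; omega)

-- splitting a weighted sum along a filter
theorem sum_filter_split {Q : Type} (w : Q → Int) (p : Q → Bool) :
    ∀ qs : List Q,
      ((qs.filter p).map w).sum + ((qs.filter (fun q => !(p q))).map w).sum = (qs.map w).sum := by
  intro qs
  induction qs with
  | nil => simp
  | cons q qs ih =>
    by_cases h : p q = true <;> simp [h] <;> omega

-- a weighted sum over a partition by discipline
theorem partition_sum (w : List (String × String) → Int) :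
    ∀ (K : List String), K.Nodup →
      ∀ qs : List (List (String × String)), (∀ q ∈ qs, pvDisc q ∈ K) →
        (K.map (fun c => ((qs.filter (fun q => pvDisc q == c)).map w).sum)).sum = (qs.map w).sum := by
  intro K
  induction K with
  | nil =>
    intro _ qs h
    have : qs = [] := by
      cases qs with
      | nil => rfl
      | cons q qs => exact absurd (h q (by simp)) (by simp)
    simp [this]
  | cons c K ih =>
    intro hnd qs h
    have hnd' : K.Nodup := (List.nodup_cons.mp hnd).2
    have hcK : c ∉ K := (List.nodup_cons.mp hnd).1
    have hrest : ∀ c' ∈ K,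
        qs.filter (fun q => pvDisc q == c') =
          (qs.filter (fun q => !(pvDisc q == c))).filter (fun q => pvDisc q == c') := by
      intro c' hc'
      rw [List.filter_filter]
      apply List.filter_congr
      intro q _
      by_cases hq : pvDisc q = c'
      · have hne : (pvDisc q == c) = false := by
          simp only [beq_eq_false_iff_ne]; rw [hq]; intro hh; exact hcK (hh ▸ hc')
        simp [hq]
        exact fun hh => hcK (hh ▸ hc')
      · simp [hq]
    have hqs'mem : ∀ q ∈ qs.filter (fun q => !(pvDisc q == c)), pvDisc q ∈ K := by
      intro q hq
      rcases List.mem_filter.mp hq with ⟨hqm, hne⟩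
      rcases List.mem_cons.mp (h q hqm) with hh | hh
      · simp [hh] at hne
      · exact hh
    have hmapeq : (K.map (fun c' => ((qs.filter (fun q => pvDisc q == c')).map w).sum)) =
        (K.map (fun c' => (((qs.filter (fun q => !(pvDisc q == c))).filter
          (fun q => pvDisc q == c')).map w).sum)) :=
      List.map_congr_left (fun c' hc' => by rw [hrest c' hc'])
    rw [List.map_cons, List.sum_cons, hmapeq,
      ih hnd' (qs.filter (fun q => !(pvDisc q == c))) hqs'mem]
    exact sum_filter_split w (fun q => pvDisc q == c) qs

-- B's first pass, characterised
theorem stepB1_eq (d : PySem.Dict String (List (List (String × String))))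
    (q : List (String × String)) :
    pvStepB1 d q = if pvValid q then d.modify (pvDisc q) [] (· ++ [q]) else d := by
  rcases hg : pvQGet q "gabarito" with _ | g <;>
    simp only [pvStepB1, pvValid, hg]
  · rfl
  · by_cases he : g = "" <;> simp [he]

theorem grupos_eq (l : List (List (String × String))) :
    l.foldl pvStepB1 PySem.Dict.empty =
      (pvLV l).foldl (fun d q => d.modify (pvDisc q) [] (· ++ [q])) PySem.Dict.empty := by
  rw [pvLV, List.foldl_filter]
  congr 1
  funext d q
  exact stepB1_eq d q

theorem grupos_getD (l : List (List (String × String))) (c : String) :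
    (l.foldl pvStepB1 PySem.Dict.empty).getD c [] = pvGrp c l := by
  rw [grupos_eq]
  have hmap : (pvLV l).foldl (fun d q => d.modify (pvDisc q) [] (· ++ [q])) PySem.Dict.empty =
      ((pvLV l).map (fun q => (pvDisc q, q))).foldl
        (fun d p => d.modify p.1 [] (· ++ [p.2])) PySem.Dict.empty := by
    rw [List.foldl_map]
  rw [hmap, PySem.Dict.getD_foldl_modify_append]
  simp [pvGrp, List.filter_map, Function.comp_def]

theorem grupos_keys (l : List (List (String × String))) :
    (l.foldl pvStepB1 PySem.Dict.empty).keys = pvK l := by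
  rw [grupos_eq]
  have := PySem.Dict.keys_foldl_modify_key (pvLV l) pvDisc []
    (fun _ q => (· ++ [q])) (PySem.Dict.empty (κ := String) (ν := List (List (String × String))))
  rw [this, PySem.Dict.keys_empty]
  rfl

theorem grupos_nodup (l : List (List (String × String))) :
    (l.foldl pvStepB1 PySem.Dict.empty).keys.Nodup := by
  rw [grupos_eq]
  exact PySem.Dict.nodup_keys_foldl_modify_key (pvLV l) pvDisc [] (fun _ q => (· ++ [q])) _
    (by rw [PySem.Dict.keys_empty]; exact List.nodup_nil)

theorem grupos_items (l : List (List (String × String))) :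
    (l.foldl pvStepB1 PySem.Dict.empty).items = (pvK l).map (fun c => (c, pvGrp c l)) := by
  rw [PySem.Dict.items_eq_map_keys _ (grupos_nodup l) [], grupos_keys]
  apply List.map_congr_left
  intro c _
  rw [grupos_getD]

-- B's second pass, closed form
theorem fold2_closed :
    ∀ (gs : List (String × List (List (String × String)))) (s t : Int)
      (por : PySem.Dict String (List (String × Int))),
      (∀ p ∈ gs, por.contains p.1 = false) → (gs.map (·.1)).Nodup →
      gs.foldl pvStepB2 (s, t, por) =
        (s + (gs.map (fun p => pvAcertos p.2)).sum,
         t + (gs.map (fun p => (p.2.length : Int))).sum,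
         PySem.Dict.mk (por.items ++ gs.map (fun p =>
           (p.1, [("acertos", pvAcertos p.2), ("total", (p.2.length : Int)),
                  ("erros", (p.2.length : Int) - pvAcertos p.2)])))) := by
  intro gs
  induction gs with
  | nil =>
    intro s t por _ _
    simp
  | cons p gs ih =>
    intro s t por hfresh hnd
    have hp : por.contains p.1 = false := hfresh p (by simp)
    have hins : por.insert p.1
        [("acertos", pvAcertos p.2), ("total", (p.2.length : Int)),
         ("erros", (p.2.length : Int) - pvAcertos p.2)] =
        PySem.Dict.mk (por.items ++
          [(p.1, [("acertos", pvAcertos p.2), ("total", (p.2.length : Int)),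
                  ("erros", (p.2.length : Int) - pvAcertos p.2)])]) := by
      apply PySem.Dict.ext
      rw [PySem.Dict.items_insert_of_not_contains _ _ hp]
    have hstep : pvStepB2 (s, t, por) p =
        (s + pvAcertos p.2, t + (p.2.length : Int),
          por.insert p.1 [("acertos", pvAcertos p.2), ("total", (p.2.length : Int)),
                          ("erros", (p.2.length : Int) - pvAcertos p.2)]) := rfl
    rw [List.foldl_cons, hstep, hins]
    have hfresh' : ∀ r ∈ gs, (PySem.Dict.mk (por.items ++
        [(p.1, [("acertos", pvAcertos p.2), ("total", (p.2.length : Int)),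
                ("erros", (p.2.length : Int) - pvAcertos p.2)])])).contains r.1 = false := by
      intro r hr
      rw [← hins, PySem.Dict.contains_insert]
      have h1 : por.contains r.1 = false := hfresh r (by simp [hr])
      have hnd2 : (p.1 :: gs.map (·.1)).Nodup := by rw [List.map_cons] at hnd; exact hnd
      have h2 : r.1 ≠ p.1 := fun hh => (List.nodup_cons.mp hnd2).1 (hh ▸ List.mem_map_of_mem hr)
      simp [h1, h2]
    have hnd' : (gs.map (·.1)).Nodup := by
      rw [List.map_cons] at hnd; exact (List.nodup_cons.mp hnd).2
    rw [ih (s + pvAcertos p.2) (t + (p.2.length : Int)) _ hfresh' hnd']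
    simp only [List.map_cons, List.sum_cons]
    refine congrArg₂ _ (by ring) (congrArg₂ _ (by ring) ?_)
    congr 1
    simp

theorem acertos_eq (qs : List (List (String × String))) : pvAcertos qs = pvCnt qs := by
  rw [pvAcertos, PySem.List.foldl_count_if]
  simp [pvCnt]

-- the two sum identities
theorem sum_cnt (l : List (List (String × String))) :
    ((pvK l).map (fun c => pvCnt (pvGrp c l))).sum = pvCnt (pvLV l) := by
  have hmem : ∀ q ∈ pvLV l, pvDisc q ∈ pvK l := by
    intro q hq
    rw [pvK, PySem.Set.mem_ofList]
    exact List.mem_map_of_mem hq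
  have hw : ∀ qs : List (List (String × String)),
      pvCnt qs = (qs.map (fun q => if pvCorreta q then (1 : Int) else 0)).sum := by
    intro qs
    induction qs with
    | nil => simp [pvCnt]
    | cons q qs ih =>
      by_cases h : pvCorreta q = true <;>
        simp [pvCnt, h] at ih ⊢ <;> omega
  calc ((pvK l).map (fun c => pvCnt (pvGrp c l))).sum
      = ((pvK l).map (fun c => (((pvLV l).filter (fun q => pvDisc q == c)).map
          (fun q => if pvCorreta q then (1 : Int) else 0)).sum)).sum := by
        apply congrArg
        apply List.map_congr_left
        intro c _
        rw [pvGrp, hw]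
    _ = ((pvLV l).map (fun q => if pvCorreta q then (1 : Int) else 0)).sum :=
        partition_sum _ (pvK l) (by rw [pvK]; exact PySem.Set.nodup_ofList _) (pvLV l) hmem
    _ = pvCnt (pvLV l) := (hw (pvLV l)).symm

theorem sum_len (l : List (List (String × String))) :
    ((pvK l).map (fun c => ((pvGrp c l).length : Int))).sum = ((pvLV l).length : Int) := by
  have hmem : ∀ q ∈ pvLV l, pvDisc q ∈ pvK l := by
    intro q hq
    rw [pvK, PySem.Set.mem_ofList]
    exact List.mem_map_of_mem hq
  have hw : ∀ qs : List (List (String × String)),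
      ((qs.length : Int)) = (qs.map (fun _ => (1 : Int))).sum := by
    intro qs; induction qs with
    | nil => simp
    | cons q qs ih => simp at ih ⊢; omega
  calc ((pvK l).map (fun c => ((pvGrp c l).length : Int))).sum
      = ((pvK l).map (fun c => (((pvLV l).filter (fun q => pvDisc q == c)).map
          (fun _ => (1 : Int))).sum)).sum := by
        apply congrArg
        apply List.map_congr_left
        intro c _
        rw [pvGrp, hw]
    _ = ((pvLV l).map (fun _ => (1 : Int))).sum :=
        partition_sum _ (pvK l) (by rw [pvK]; exact PySem.Set.nodup_ofList _) (pvLV l) hmem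
    _ = ((pvLV l).length : Int) := (hw (pvLV l)).symm

-- A, in closed form
theorem A_closed (l : List (List (String × String))) :
    corrigir_sessao l =
      (pvCnt (pvLV l), ((pvLV l).length : Int),
        (pvK l).map (fun c =>
          (c, [("acertos", pvCnt (pvGrp c l)), ("total", ((pvGrp c l).length : Int)),
               ("erros", ((pvGrp c l).length : Int) - pvCnt (pvGrp c l))]))) := by
  have h0 : corrigir_sessao l =
      ((l.foldl pvStepA (0, 0, PySem.Dict.empty)).1,
       (l.foldl pvStepA (0, 0, PySem.Dict.empty)).2.1,
       (l.foldl pvStepA (0, 0, PySem.Dict.empty)).2.2.items.map (fun p => (p.1, p.2.items))) := rfl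
  rw [h0, foldA_split]
  dsimp only
  rw [score_fold, total_fold]
  have hkeys : (l.foldl pvPStep PySem.Dict.empty).keys = pvK l := by
    rw [pfold_keys, PySem.Dict.keys_empty]
    rfl
  have hnd : (l.foldl pvPStep PySem.Dict.empty).keys.Nodup := by
    rw [hkeys, pvK]; exact PySem.Set.nodup_ofList _
  have hitems := PySem.Dict.items_eq_map_keys (l.foldl pvPStep PySem.Dict.empty) hnd pvI0
  rw [hitems, hkeys]
  simp only [List.map_map]
  refine congrArg₂ _ (by ring) (congrArg₂ _ (by ring) ?_)
  apply List.map_congr_left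
  intro c _
  have hget : (l.foldl pvPStep PySem.Dict.empty).getD c pvI0 =
      pvTri (pvCnt (pvGrp c l)) ((pvGrp c l).length : Int)
        (((pvGrp c l).length : Int) - pvCnt (pvGrp c l)) := by
    rw [pfold_getD l PySem.Dict.empty c, PySem.Dict.getD_empty]
    have : pvI0 = pvTri 0 0 0 := rfl
    rw [this, fold_tri]
    rw [tri_eq_iff]
    refine ⟨by ring, by ring, by ring⟩
  simp only [Function.comp_def, hget]
  rfl

-- B, in closed form
theorem B_closed (l : List (List (String × String))) :
    corrigir_sessao_alt l =
      (pvCnt (pvLV l), ((pvLV l).length : Int),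
        (pvK l).map (fun c =>
          (c, [("acertos", pvCnt (pvGrp c l)), ("total", ((pvGrp c l).length : Int)),
               ("erros", ((pvGrp c l).length : Int) - pvCnt (pvGrp c l))]))) := by
  have h0 : corrigir_sessao_alt l =
      (((l.foldl pvStepB1 PySem.Dict.empty).items.foldl pvStepB2 (0, 0, PySem.Dict.empty)).1,
       ((l.foldl pvStepB1 PySem.Dict.empty).items.foldl pvStepB2 (0, 0, PySem.Dict.empty)).2.1,
       ((l.foldl pvStepB1 PySem.Dict.empty).items.foldl pvStepB2 (0, 0, PySem.Dict.empty)).2.2.items) := rfl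
  rw [h0, grupos_items]
  have hnd : (((pvK l).map (fun c => (c, pvGrp c l))).map (·.1)).Nodup := by
    simp only [List.map_map, Function.comp_def]
    simpa [pvK] using PySem.Set.nodup_ofList ((pvLV l).map pvDisc)
  have hfresh : ∀ p ∈ (pvK l).map (fun c => (c, pvGrp c l)),
      (PySem.Dict.empty (κ := String) (ν := List (String × Int))).contains p.1 = false := by
    intro p _; exact PySem.Dict.contains_empty p.1
  rw [fold2_closed _ 0 0 _ hfresh hnd]
  simp only [List.map_map, Function.comp_def, acertos_eq]
  refine congrArg₂ _ ?_ (congrArg₂ _ ?_ ?_)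
  · rw [zero_add]; exact sum_cnt l
  · rw [zero_add]; exact sum_len l
  · rfl

-- ===== VERDICT (by name: the statement is the Claim_ definition above) =====
theorem corrigir_sessao_spec : Claim_equal_corrigir_sessao := by
  intro questoes _
  unfold Spec_corrigir_sessao
  rw [A_closed, B_closed]
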